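-- pv_equiv track=rewrite | github.com/GaboUCR/Mit-Introduction-to-python | ps4/ps4a.py | put_char_on_string
-- ===== SOURCE A (Python) =====
-- def put_char_on_string(sequence, last_char) :
--     '''
--     Gives a list of strings where each element is the string sequence with the
--     letter last_char between each letter, for example:
--     Sequence = "ab"
--     last_char = "c"
--     Returns [cab,acb,abc...]
--
--
--     '''
--     sequence_list = []
--     for N_list in range(len(sequence)) :
--
--         sequence_list_elements = ""
--
--         for N_letter in range(len(sequence)) :
--             if (N_list == N_letter):
--                 sequence_list_elements += last_char
--
--             sequence_list_elements += sequence[N_letter]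
--         sequence_list.append(sequence_list_elements)
--
--     sequence_list.append(sequence + last_char)
--     return sequence_list
-- ===== SOURCE B (Python) =====
-- def put_char_on_string(sequence, last_char):
--     return [sequence[:i] + last_char + sequence[i:]
--             for i in range(len(sequence) + 1)]
-- ===== Notes on version B (the rewrite author's own statement) =====
-- stated objective: simpler
-- what changed: Replaces the nested per-letter loop with its position-equality test and the separate trailing append by a single comprehension over the n+1 split points, building each result directly by slicing.
import Mathlib
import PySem

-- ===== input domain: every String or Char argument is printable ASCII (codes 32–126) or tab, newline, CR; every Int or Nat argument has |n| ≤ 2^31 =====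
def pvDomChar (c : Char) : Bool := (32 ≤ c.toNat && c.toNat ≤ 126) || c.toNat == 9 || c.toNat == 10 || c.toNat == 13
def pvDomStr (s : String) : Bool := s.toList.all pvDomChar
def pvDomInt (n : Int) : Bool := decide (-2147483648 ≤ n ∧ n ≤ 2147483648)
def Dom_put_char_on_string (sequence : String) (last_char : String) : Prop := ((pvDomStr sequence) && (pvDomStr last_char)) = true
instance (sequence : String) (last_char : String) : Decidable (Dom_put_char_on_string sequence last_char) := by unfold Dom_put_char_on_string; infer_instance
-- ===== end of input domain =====

-- B replaces A's nested loop plus trailing append by one comprehension over the n+1 split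
-- points, building each result by slicing (objective: simpler).

-- ===== PORT A =====
def put_char_on_string (sequence : String) (last_char : String) : List String :=
  let s := sequence.toList
  let lc := last_char.toList
  let sequence_list :=
    (PySem.List.pyRange 0 s.length 1).foldl
      (fun acc n_list =>
        let elems :=
          (PySem.List.pyRange 0 s.length 1).foldl
            (fun e n_letter =>
              (if n_list = n_letter then e ++ lc else e)
                ++ [PySem.List.pyGetD s n_letter ' '])   -- index always in range here
            []
        acc ++ [String.ofList elems])
      []
  sequence_list ++ [String.ofList (s ++ lc)]

-- ===== PORT B =====
def put_char_on_string_alt (sequence : String) (last_char : String) : List String :=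
  let s := sequence.toList
  let lc := last_char.toList
  (PySem.List.pyRange 0 (s.length + 1) 1).map
    (fun i => String.ofList (PySem.List.slice s none (some i) ++ lc
                              ++ PySem.List.slice s (some i) none))

-- ===== PRECONDITION & SPEC =====
def Spec_put_char_on_string (sequence : String) (last_char : String) (out : List String) : Prop := out = put_char_on_string_alt sequence last_char
instance (sequence : String) (last_char : String) (out : List String) : Decidable (Spec_put_char_on_string sequence last_char out) := by unfold Spec_put_char_on_string; infer_instance

-- ===== CLAIM (what is proved, stated in full; the proofs are below) =====
def Claim_equal_put_char_on_string : Prop := ∀ (sequence : String) (last_char : String), Dom_put_char_on_string sequence last_char → Spec_put_char_on_string sequence last_char (put_char_on_string sequence last_char)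

-- ===== LEMMAS AND PROOFS =====

-- [s[j] for j in range(m)] is s.take m (m <= len s)
theorem map_pyGetD_range_take (s : List Char) (d : Char) (m : Nat) (h : m ≤ s.length) :
    (PySem.List.pyRange 0 (m : Int) 1).map (fun j => PySem.List.pyGetD s j d) = s.take m := by
  induction m with
  | zero => simp [PySem.List.pyRange_one_eq_nil]
  | succ k ih =>
    have hc : ((k + 1 : Nat) : Int) = (k : Int) + 1 := by push_cast; ring
    rw [hc, PySem.List.pyRange_one_succ_right (by omega : (0:Int) ≤ (k:Int)), List.map_append,
      ih (by omega), List.map_cons, List.map_nil, PySem.List.pyGetD_natCast]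
    have hlt : k < s.length := by omega
    rw [List.take_add_one, List.getElem?_eq_getElem hlt]
    simp [List.getD_eq_getElem?_getD, List.getElem?_eq_getElem hlt]

-- A's inner loop builds take nl ++ lc ++ drop nl, for 0 ≤ nl < len s
theorem inner_loop_eq (s lc : List Char) (d : Char) (nl : Int)
    (h0 : 0 ≤ nl) (h : nl < (s.length : Int)) :
    (PySem.List.pyRange 0 (s.length : Int) 1).foldl
      (fun e j => (if nl = j then e ++ lc else e) ++ [PySem.List.pyGetD s j d]) []
      = s.take nl.toNat ++ lc ++ s.drop nl.toNat := by
  have hcast : nl = ((nl.toNat : Nat) : Int) := by omega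
  have hsplit : PySem.List.pyRange 0 (s.length : Int) 1
      = PySem.List.pyRange 0 nl 1
        ++ (nl :: PySem.List.pyRange (nl + 1) (s.length : Int) 1) := by
    rw [PySem.List.pyRange_one_append 0 nl (s.length : Int) h0 (by omega),
      PySem.List.pyRange_one_cons h]
  rw [hsplit, List.foldl_append]
  have h1 : (PySem.List.pyRange 0 nl 1).foldl
      (fun e j => (if nl = j then e ++ lc else e) ++ [PySem.List.pyGetD s j d]) []
      = s.take nl.toNat := by
    rw [PySem.List.foldl_congr_mem _ _ (fun e j => e ++ [PySem.List.pyGetD s j d]) _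
        (by intro acc x hx
            have hm := (PySem.List.mem_pyRange_one).1 hx
            have hne : ¬ (nl = x) := by omega
            simp [hne]),
      PySem.List.foldl_append_singleton_eq_map,
      show PySem.List.pyRange 0 nl 1 = PySem.List.pyRange 0 ((nl.toNat : Nat) : Int) 1 by
        rw [← hcast]]
    simpa using map_pyGetD_range_take s d nl.toNat (by omega)
  rw [h1, List.foldl_cons, if_pos rfl,
    PySem.List.foldl_congr_mem _ _ (fun e j => e ++ [PySem.List.pyGetD s j d]) _
      (by intro acc x hx
          have hm := (PySem.List.mem_pyRange_one).1 hx
          have hne : ¬ (nl = x) := by omega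
          simp [hne]),
    PySem.List.foldl_append_singleton_eq_map,
    show (s.length : Int) = PySem.List.len s from rfl,
    PySem.List.map_pyGetD_pyRange s d (by omega : (0:Int) ≤ nl + 1),
    show (nl + 1).toNat = nl.toNat + 1 by omega]
  have h6 : PySem.List.pyGetD s nl d :: s.drop (nl.toNat + 1) = s.drop nl.toNat := by
    rw [List.drop_eq_getElem_cons (show nl.toNat < s.length by omega)]
    congr 1
    exact PySem.List.pyGetD_eq_getElem s d h0 h
  simp [← h6]

-- ===== VERDICT (by name: the statement is the Claim_ definition above) =====
theorem put_char_on_string_spec : Claim_equal_put_char_on_string := by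
  intro sequence last_char _
  unfold Spec_put_char_on_string put_char_on_string put_char_on_string_alt
  set s := sequence.toList with hs
  set lc := last_char.toList with hlc
  simp only []
  rw [PySem.List.foldl_congr_mem _ _
      (fun acc (n_list : Int) => acc ++ [String.ofList
        (s.take n_list.toNat ++ lc ++ s.drop n_list.toNat)]) _
      (by intro acc x hx
          have hm := (PySem.List.mem_pyRange_one).1 hx
          rw [inner_loop_eq s lc ' ' x hm.1 hm.2]),
    PySem.List.foldl_append_singleton_eq_map,
    PySem.List.pyRange_one_succ_right (by omega : (0:Int) ≤ (s.length : Int)),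
    List.map_append]
  congr 1
  · simp only [List.nil_append]
    apply List.map_congr_left
    intro x hx
    have hm := (PySem.List.mem_pyRange_one).1 hx
    have hcast : x = ((x.toNat : Nat) : Int) := by omega
    rw [hcast, PySem.List.slice_to_natCast, PySem.List.slice_from_natCast]
    simp [show max x 0 = x by omega]
  · rw [List.map_cons, List.map_nil,
      show (s.length : Int) = ((s.length : Nat) : Int) from rfl,
      PySem.List.slice_to_natCast, PySem.List.slice_from_natCast]
    simp
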